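-- pv_equiv track=rewrite | github.com/tmc/mlx-transformer-vm | mlx_transformer_vm/scheduler/milp.py | interval_coloring
-- ===== SOURCE A (Python) =====
-- import heapq
--
-- def interval_coloring(all_dims, dim_birth, dim_death, fixed=None):
--     """Assign slots greedily to interval lifetimes."""
--
--     fixed = fixed or {}
--     remaining = [dimension for dimension in all_dims if dimension not in fixed]
--     items = sorted(
--         (dim_birth[dimension], dim_death[dimension], idx, dimension)
--         for idx, dimension in enumerate(remaining)
--         if dimension in dim_birth and dimension in dim_death and dim_death[dimension] > dim_birth[dimension]
--     )
--     slot_of = dict(fixed)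
--     free = []
--     next_slot = max(fixed.values(), default=-1) + 1
--     for dimension, slot in fixed.items():
--         if dimension in dim_death:
--             heapq.heappush(free, (dim_death[dimension], slot))
--
--     for birth, death_phase, _idx, dimension in items:
--         available = []
--         while free and free[0][0] <= birth:
--             available.append(heapq.heappop(free)[1])
--         if available:
--             slot = min(available)
--             for free_slot in available:
--                 if free_slot != slot:
--                     heapq.heappush(free, (birth, free_slot))
--         else:
--             slot = next_slot
--             next_slot += 1
--         slot_of[dimension] = slot
--         heapq.heappush(free, (death_phase, slot))
--
--     return slot_of
-- ===== SOURCE B (Python) =====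
-- import heapq
--
-- def interval_coloring(all_dims, dim_birth, dim_death, fixed=None):
--     """Assign slots greedily to interval lifetimes (two-heap greedy: each freed
--     slot moves once from a pending heap keyed by death to a free-slot heap)."""
--
--     fixed = fixed or {}
--     slot_of = dict(fixed)
--     items = []
--     idx = 0
--     for dimension in all_dims:
--         if dimension in fixed:
--             continue
--         if dimension in dim_birth and dimension in dim_death and dim_death[dimension] > dim_birth[dimension]:
--             items.append((dim_birth[dimension], dim_death[dimension], idx, dimension))
--         idx += 1
--     items.sort()
--
--     pending = []      # (death, slot): slots still tied to a live interval
--     free_slots = []   # min-heap of slot numbers that are free now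
--     next_slot = max(fixed.values(), default=-1) + 1
--     for dimension, slot in fixed.items():
--         if dimension in dim_death:
--             heapq.heappush(pending, (dim_death[dimension], slot))
--
--     for birth, death_phase, _idx, dimension in items:
--         while pending and pending[0][0] <= birth:
--             heapq.heappush(free_slots, heapq.heappop(pending)[1])
--         if free_slots:
--             slot = heapq.heappop(free_slots)
--             while free_slots and free_slots[0] == slot:
--                 heapq.heappop(free_slots)  # duplicate frees of this slot collapse
--         else:
--             slot = next_slot
--             next_slot += 1
--         slot_of[dimension] = slot
--         heapq.heappush(pending, (death_phase, slot))
--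
--     return slot_of
-- ===== Notes on version B (the rewrite author's own statement) =====
-- stated objective: alternative
-- what changed: A re-scans freed slots on every allocation (pops every expired heap entry, takes the min slot, pushes the others back re-keyed to the current birth, so the same slots are popped and re-pushed again and again); B keeps two heaps - pending (death, slot) pairs and a min-heap of currently-free slot numbers - so each freed slot moves exactly once from pending to the free heap and an allocation is a single heappop (popping further copies of the allocated slot, exactly as A's push-back filter collapses duplicate frees).
import Mathlib
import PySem

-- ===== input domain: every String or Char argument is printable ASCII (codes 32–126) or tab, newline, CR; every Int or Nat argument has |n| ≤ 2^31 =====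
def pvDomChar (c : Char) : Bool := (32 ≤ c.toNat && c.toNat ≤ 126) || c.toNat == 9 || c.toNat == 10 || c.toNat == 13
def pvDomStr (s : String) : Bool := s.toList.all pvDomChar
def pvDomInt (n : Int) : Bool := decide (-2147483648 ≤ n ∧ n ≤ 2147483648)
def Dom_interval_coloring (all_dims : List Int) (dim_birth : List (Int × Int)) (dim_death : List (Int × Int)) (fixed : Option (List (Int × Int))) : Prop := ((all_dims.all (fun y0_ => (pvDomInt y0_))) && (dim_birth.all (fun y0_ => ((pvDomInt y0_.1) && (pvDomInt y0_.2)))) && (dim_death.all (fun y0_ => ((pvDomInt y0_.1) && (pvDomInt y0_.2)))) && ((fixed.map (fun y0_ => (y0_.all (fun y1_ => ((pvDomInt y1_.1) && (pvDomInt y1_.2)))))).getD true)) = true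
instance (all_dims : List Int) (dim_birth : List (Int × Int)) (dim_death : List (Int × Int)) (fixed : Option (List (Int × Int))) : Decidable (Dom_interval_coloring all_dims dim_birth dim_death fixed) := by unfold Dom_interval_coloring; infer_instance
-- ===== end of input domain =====

-- B replaces A's re-scan of freed slots (pop all, take min, push the rest back re-keyed)
-- by two heaps — pending (death, slot) and free slot numbers — moving each freed slot once.

-- ===== PORT A =====
-- Python `<` on int pairs is the lexicographic order.
def pairLt (a b : Int × Int) : Bool := a.1 < b.1 || (a.1 == b.1 && a.2 < b.2)

-- heapq on a list of int pairs, modelled as a lexicographically sorted list: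
-- heappush = ordered insert, heappop = pop at the head, heap[0] = head.  This is exact
-- for every observation A and B make of a heap (heap[0] and the sequence of heappop
-- results), because the lex order on int pairs is total, so those observations depend
-- only on the multiset of heap entries.
def hpush (h : List (Int × Int)) (x : Int × Int) : List (Int × Int) :=
  PySem.List.insertBy pairLt x h

-- the body of A's `for birth, death_phase, _idx, dimension in items:` loop
def stepA (st : PySem.Dict Int Int × List (Int × Int) × Int)
    (t : Int × Int × Int × Int) : PySem.Dict Int Int × List (Int × Int) × Int :=
  let birth := t.1
  -- `while free and free[0][0] <= birth: available.append(heapq.heappop(free)[1])`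
  -- on the sorted-list heap: take/drop the longest prefix with key ≤ birth
  let available := (st.2.1.takeWhile (fun q => decide (q.1 ≤ birth))).map (·.2)
  let free1 := st.2.1.dropWhile (fun q => decide (q.1 ≤ birth))
  if available ≠ [] then
    let slot := PySem.List.minD available (fun s => s) 0
    let free2 := available.foldl (fun f s => if s != slot then hpush f (birth, s) else f) free1
    (st.1.insert t.2.2.2 slot, hpush free2 (t.2.1, slot), st.2.2)
  else
    (st.1.insert t.2.2.2 st.2.2, hpush free1 (t.2.1, st.2.2), st.2.2 + 1)

def interval_coloring (all_dims : List Int) (dim_birth : List (Int × Int)) (dim_death : List (Int × Int)) (fixed : Option (List (Int × Int))) : List (Int × Int) :=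
  let fixed' := PySem.Dict.ofList (fixed.getD [])   -- fixed = fixed or {}
  let db := PySem.Dict.ofList dim_birth
  let dd := PySem.Dict.ofList dim_death
  let remaining := all_dims.filter (fun d => !(fixed'.contains d))
  -- sorted(...) of 4-tuples: the idx components are pairwise distinct, so Python's
  -- lexicographic 4-tuple sort is exactly the STABLE sort by the first two components.
  let items := PySem.List.sorted2
    (((PySem.List.enumerate remaining 0).filter (fun p =>
        db.contains p.2 && dd.contains p.2 && decide (db.getD p.2 0 < dd.getD p.2 0))).map
      (fun p => (db.getD p.2 0, dd.getD p.2 0, p.1, p.2)))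
    (fun t => t.1) (fun t => t.2.1)
  let next_slot := PySem.List.maxD fixed'.values (fun v => v) (-1) + 1
  let free := fixed'.items.foldl
    (fun f q => if dd.contains q.1 then hpush f (dd.getD q.1 0, q.2) else f) []
  (items.foldl stepA (fixed', free, next_slot)).1.items

-- ===== PORT B =====
-- heapq on a list of ints (B's free-slot heap), same sorted-list model as hpush.
def hpushI (h : List Int) (x : Int) : List Int :=
  PySem.List.insertBy (fun a b => decide (a < b)) x h

-- the body of B's scheduling loop: move expired pending entries once, then pop the
-- smallest free slot (or open a fresh one)
def stepB (st : PySem.Dict Int Int × List (Int × Int) × List Int × Int)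
    (t : Int × Int × Int × Int) : PySem.Dict Int Int × List (Int × Int) × List Int × Int :=
  let birth := t.1
  let moved := (st.2.1.takeWhile (fun q => decide (q.1 ≤ birth))).map (·.2)
  let pending1 := st.2.1.dropWhile (fun q => decide (q.1 ≤ birth))
  let freeS := moved.foldl (fun f s => hpushI f s) st.2.2.1
  match freeS with
  | slot :: rest =>
    -- `while free_slots and free_slots[0] == slot: heappop(free_slots)` on the sorted
    -- list: any further copies of the just-allocated minimum are the leading run
    (st.1.insert t.2.2.2 slot, hpush pending1 (t.2.1, slot),
      rest.dropWhile (fun s => s == slot), st.2.2.2)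
  | [] => (st.1.insert t.2.2.2 st.2.2.2, hpush pending1 (t.2.1, st.2.2.2), [], st.2.2.2 + 1)

def interval_coloring_alt (all_dims : List Int) (dim_birth : List (Int × Int)) (dim_death : List (Int × Int)) (fixed : Option (List (Int × Int))) : List (Int × Int) :=
  let fixed' := PySem.Dict.ofList (fixed.getD [])   -- fixed = fixed or {}
  let db := PySem.Dict.ofList dim_birth
  let dd := PySem.Dict.ofList dim_death
  -- one explicit pass over all_dims building the (birth, death, idx, dim) items
  let built := all_dims.foldl
    (fun (st : List (Int × Int × Int × Int) × Int) d =>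
      if fixed'.contains d then st
      else if db.contains d && dd.contains d && decide (db.getD d 0 < dd.getD d 0) then
        (st.1 ++ [(db.getD d 0, dd.getD d 0, st.2, d)], st.2 + 1)
      else (st.1, st.2 + 1))
    ([], 0)
  -- items.sort(): stable 2-key sort is exact, the idx components are distinct
  let items := PySem.List.sorted2 built.1 (fun t => t.1) (fun t => t.2.1)
  let next_slot := PySem.List.maxD fixed'.values (fun v => v) (-1) + 1
  let pending := fixed'.items.foldl
    (fun f q => if dd.contains q.1 then hpush f (dd.getD q.1 0, q.2) else f) []
  (items.foldl stepB (fixed', pending, [], next_slot)).1.items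

-- ===== PRECONDITION & SPEC =====
-- A raises no exception on any well-typed input, so there is no Pre_.
def Spec_interval_coloring (all_dims : List Int) (dim_birth : List (Int × Int)) (dim_death : List (Int × Int)) (fixed : Option (List (Int × Int))) (out : List (Int × Int)) : Prop := out = interval_coloring_alt all_dims dim_birth dim_death fixed
instance (all_dims : List Int) (dim_birth : List (Int × Int)) (dim_death : List (Int × Int)) (fixed : Option (List (Int × Int))) (out : List (Int × Int)) : Decidable (Spec_interval_coloring all_dims dim_birth dim_death fixed out) := by unfold Spec_interval_coloring; infer_instance

-- ===== CLAIM (what is proved, stated in full; the proofs are below) =====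
def Claim_equal_interval_coloring : Prop := ∀ (all_dims : List Int) (dim_birth : List (Int × Int)) (dim_death : List (Int × Int)) (fixed : Option (List (Int × Int))), Dom_interval_coloring all_dims dim_birth dim_death fixed → Spec_interval_coloring all_dims dim_birth dim_death fixed (interval_coloring all_dims dim_birth dim_death fixed)

-- ===== LEMMAS AND PROOFS =====

-- the lexicographic sort/heap keys used throughout the proofs
def keyP (p : Int × Int) : Lex (Int × Int) := toLex p
def keyT (t : Int × Int × Int × Int) : Lex (Int × Int) := toLex (t.1, t.2.1)

theorem pairLt_eq_decide : pairLt = fun a b => decide (keyP a < keyP b) := by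
  funext a b
  simp only [pairLt, keyP, Prod.Lex.lt_iff, ofLex_toLex]
  by_cases h1 : a.1 < b.1 <;> by_cases h2 : a.1 = b.1 <;> by_cases h3 : a.2 < b.2 <;>
    simp [h1, h2, h3]

theorem hpush_perm (h : List (Int × Int)) (x : Int × Int) : (hpush h x).Perm (x :: h) :=
  PySem.List.insertBy_perm _ _ _

theorem hpush_pairwise {h : List (Int × Int)} (x : Int × Int)
    (hp : h.Pairwise (fun a b => keyP a ≤ keyP b)) :
    (hpush h x).Pairwise (fun a b => keyP a ≤ keyP b) := by
  rw [hpush, pairLt_eq_decide]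
  exact PySem.List.insertBy_pairwise_le keyP x h hp

theorem hpushI_perm (h : List Int) (x : Int) : (hpushI h x).Perm (x :: h) :=
  PySem.List.insertBy_perm _ _ _

theorem hpushI_pairwise {h : List Int} (x : Int) (hp : h.Pairwise (· ≤ ·)) :
    (hpushI h x).Pairwise (· ≤ ·) := by
  have := PySem.List.insertBy_pairwise_le (fun s : Int => s) x h hp
  exact this

-- sorted prefix extraction: on a list whose keyP's are nondecreasing, the
-- `while heap[0][0] <= b` pops are exactly the entries with first component ≤ b
theorem takeWhile_eq_filter_of_pw (b : Int) :
    ∀ (l : List (Int × Int)), l.Pairwise (fun a c => keyP a ≤ keyP c) →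
      l.takeWhile (fun q => decide (q.1 ≤ b)) = l.filter (fun q => decide (q.1 ≤ b)) ∧
      l.dropWhile (fun q => decide (q.1 ≤ b)) = l.filter (fun q => !decide (q.1 ≤ b)) := by
  intro l
  induction l with
  | nil => simp
  | cons h t ih =>
    intro hpw
    rw [List.pairwise_cons] at hpw
    obtain ⟨hh, ht⟩ := hpw
    by_cases hq : h.1 ≤ b
    · obtain ⟨h1, h2⟩ := ih ht
      simp [hq, h1, h2]
    · have hnone : ∀ x ∈ t, ¬ (x.1 ≤ b) := by
        intro x hx
        have hle := hh x hx
        rw [keyP, keyP, Prod.Lex.le_iff] at hle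
        simp only [ofLex_toLex] at hle
        omega
      constructor
      · rw [List.takeWhile_cons, if_neg (by simp [hq]), eq_comm, List.filter_eq_nil_iff]
        intro x hx
        rcases List.mem_cons.mp hx with rfl | hx
        · simp [hq]
        · simp [hnone x hx]
      · rw [List.dropWhile_cons, if_neg (by simp [hq]), eq_comm, List.filter_eq_self]
        intro x hx
        rcases List.mem_cons.mp hx with rfl | hx
        · simp [hq]
        · simp [hnone x hx]

-- a conditional heap-push loop, up to multiset
theorem foldl_condpush_perm {α : Type} (c : α → Bool) (g : α → Int × Int) :
    ∀ (xs : List α) (acc : List (Int × Int)),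
      (xs.foldl (fun f s => if c s then hpush f (g s) else f) acc).Perm
        ((xs.filter c).map g ++ acc) := by
  intro xs
  induction xs with
  | nil => intro acc; simp
  | cons x xs ih =>
    intro acc
    simp only [List.foldl_cons, List.filter_cons]
    by_cases hc : c x = true
    · rw [if_pos hc, if_pos hc]
      refine (ih _).trans ?_
      refine (List.Perm.append_left _ (hpush_perm acc (g x))).trans ?_
      simpa using List.perm_middle.symm
    · rw [if_neg hc, if_neg hc]
      exact ih acc

theorem foldl_condpush_pairwise {α : Type} (c : α → Bool) (g : α → Int × Int) :
    ∀ (xs : List α) (acc : List (Int × Int)),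
      acc.Pairwise (fun a b => keyP a ≤ keyP b) →
      (xs.foldl (fun f s => if c s then hpush f (g s) else f) acc).Pairwise
        (fun a b => keyP a ≤ keyP b) := by
  intro xs
  induction xs with
  | nil => intro acc h; exact h
  | cons x xs ih =>
    intro acc h
    simp only [List.foldl_cons]
    by_cases hc : c x = true
    · simp only [hc, if_true]
      exact ih _ (hpush_pairwise _ h)
    · simp only [hc]
      exact ih _ h

theorem foldl_hpushI_perm : ∀ (xs : List Int) (acc : List Int),
    (xs.foldl (fun f s => hpushI f s) acc).Perm (xs ++ acc) := by
  intro xs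
  induction xs with
  | nil => intro acc; simp
  | cons x xs ih =>
    intro acc
    simp only [List.foldl_cons]
    refine (ih _).trans ?_
    refine (List.Perm.append_left _ (hpushI_perm acc x)).trans ?_
    simpa using List.perm_middle.symm

theorem foldl_hpushI_pairwise : ∀ (xs : List Int) (acc : List Int),
    acc.Pairwise (· ≤ ·) → (xs.foldl (fun f s => hpushI f s) acc).Pairwise (· ≤ ·) := by
  intro xs
  induction xs with
  | nil => intro acc h; exact h
  | cons x xs ih => intro acc h; exact ih _ (hpushI_pairwise x h)

-- min(available) is determined by the multiset: it equals the head of any sorted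
-- rearrangement
theorem minD_eq_head_of_perm {xs : List Int} {s0 : Int} {rest : List Int}
    (hperm : xs.Perm (s0 :: rest)) (hpw : (s0 :: rest).Pairwise (· ≤ ·)) :
    PySem.List.minD xs (fun s => s) 0 = s0 := by
  have hne : xs ≠ [] := by
    intro h
    subst h
    simpa using hperm.length_eq
  have hmem := PySem.List.minD_mem xs (fun s => s) 0 hne
  have hm_in : PySem.List.minD xs (fun s => s) 0 ∈ s0 :: rest := hperm.subset hmem
  have h2 : PySem.List.minD xs (fun s => s) 0 ≤ s0 :=
    PySem.List.minD_id_le xs 0 s0 (hperm.symm.subset (List.mem_cons_self))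
  have h1 : s0 ≤ PySem.List.minD xs (fun s => s) 0 := by
    rcases List.mem_cons.mp hm_in with hm | hm
    · omega
    · exact (List.pairwise_cons.mp hpw).1 _ hm
  omega

theorem foldl_insertBy_pairwise {α κ : Type} [LinearOrder κ] (key : α → κ) :
    ∀ (xs acc : List α), acc.Pairwise (fun a b => key a ≤ key b) →
      (xs.foldl (fun acc x => PySem.List.insertBy (fun a b => decide (key a < key b)) x acc) acc).Pairwise
        (fun a b => key a ≤ key b) := by
  intro xs
  induction xs with
  | nil => intro acc h; exact h
  | cons x xs ih =>
    intro acc h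
    simp only [List.foldl_cons]
    exact ih _ (PySem.List.insertBy_pairwise_le key x acc h)

-- on a sorted free-slot list whose elements dominate the popped minimum s0, dropping
-- A's remaining copies of s0 (filter) is B's `while free_slots[0] == slot` pop loop
theorem filter_ne_eq_dropWhile_eq (s0 : Int) :
    ∀ (l : List Int), l.Pairwise (· ≤ ·) → (∀ x ∈ l, s0 ≤ x) →
      l.filter (fun s => s != s0) = l.dropWhile (fun s => s == s0) := by
  intro l
  induction l with
  | nil => simp
  | cons h t ih =>
    intro hpw hge
    rw [List.pairwise_cons] at hpw
    by_cases hh : h = s0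
    · subst hh
      rw [List.filter_cons, if_neg (by simp), List.dropWhile_cons, if_pos (by simp)]
      exact ih hpw.2 (fun x hx => hge x (List.mem_cons_of_mem _ hx))
    · rw [List.filter_cons, if_pos (by simp [hh]), List.dropWhile_cons, if_neg (by simp [hh])]
      congr 1
      rw [List.filter_eq_self]
      intro x hx
      have h1 : s0 ≤ h := hge h List.mem_cons_self
      have h2 : h ≤ x := hpw.1 x hx
      simp only [bne_iff_ne, ne_eq]
      omega

-- sorted2 with Int keys orders the list by the lexicographic pair key
theorem sorted2_pairwise_keyT (xs : List (Int × Int × Int × Int)) :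
    (PySem.List.sorted2 xs (fun t => t.1) (fun t => t.2.1) false).Pairwise
      (fun a b => keyT a ≤ keyT b) := by
  have hbefore : (fun (a b : Int × Int × Int × Int) =>
      decide (a.1 < b.1) || (!decide (b.1 < a.1) && decide (a.2.1 < b.2.1)))
      = fun a b => decide (keyT a < keyT b) := by
    funext a b
    simp only [keyT, Prod.Lex.lt_iff, ofLex_toLex]
    by_cases h1 : a.1 < b.1 <;> by_cases h2 : b.1 < a.1 <;> by_cases h3 : a.2.1 < b.2.1 <;>
      simp [h1, h2, h3] <;> omega
  rw [PySem.List.sorted2.eq_def]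
  simp only [Bool.false_eq_true, if_false, hbefore]
  exact foldl_insertBy_pairwise keyT xs [] List.Pairwise.nil

-- B's one-pass items construction equals A's enumerate/filter/map construction
theorem build_items_eq (fx : PySem.Dict Int Int) (db dd : PySem.Dict Int Int) :
    ∀ (ds : List Int) (acc : List (Int × Int × Int × Int)) (k : Int),
      (ds.foldl
        (fun (st : List (Int × Int × Int × Int) × Int) d =>
          if fx.contains d then st
          else if db.contains d && dd.contains d && decide (db.getD d 0 < dd.getD d 0) then
            (st.1 ++ [(db.getD d 0, dd.getD d 0, st.2, d)], st.2 + 1)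
          else (st.1, st.2 + 1))
        (acc, k)).1
      = acc ++ ((PySem.List.enumerate (ds.filter (fun d => !(fx.contains d))) k).filter
          (fun p => db.contains p.2 && dd.contains p.2 && decide (db.getD p.2 0 < dd.getD p.2 0))).map
          (fun p => (db.getD p.2 0, dd.getD p.2 0, p.1, p.2)) := by
  intro ds
  induction ds with
  | nil => intro acc k; simp [PySem.List.enumerate_nil]
  | cons d ds ih =>
    intro acc k
    simp only [List.foldl_cons, List.filter_cons]
    by_cases hf : fx.contains d = true
    · simp only [hf, Bool.not_true, Bool.false_eq_true, if_true, if_false]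
      exact ih acc k
    · rw [Bool.not_eq_true] at hf
      simp only [hf, Bool.not_false, if_true, Bool.false_eq_true, if_false,
        PySem.List.enumerate_cons, List.filter_cons]
      by_cases hc : (db.contains d && dd.contains d && decide (db.getD d 0 < dd.getD d 0)) = true
      · simp only [hc, if_true]
        rw [ih]
        simp
      · simp only [hc, Bool.false_eq_true, if_false]
        exact ih acc (k + 1)

-- the main coupling: A's single re-keyed heap against B's pending/free pair.
-- tag collects the free slots as A keeps them in its heap (re-keyed to some past birth).
theorem loop_eq :
    ∀ (items : List (Int × Int × Int × Int)),
      items.Pairwise (fun a b => keyT a ≤ keyT b) →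
      ∀ (dct : PySem.Dict Int Int) (free pend : List (Int × Int)) (fs : List Int)
        (n : Int) (tag : List (Int × Int)),
        free.Pairwise (fun a b => keyP a ≤ keyP b) →
        pend.Pairwise (fun a b => keyP a ≤ keyP b) →
        fs.Pairwise (· ≤ ·) →
        free.Perm (pend ++ tag) →
        (tag.map (·.2)).Perm fs →
        (∀ p ∈ tag, ∀ t ∈ items, p.1 ≤ t.1) →
        (items.foldl stepA (dct, free, n)).1 = (items.foldl stepB (dct, pend, fs, n)).1 := by
  intro items
  induction items with
  | nil =>
    intro _ dct free pend fs n tag _ _ _ _ _ _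
    rfl
  | cons t rest ih =>
    intro hpw dct free pend fs n tag hPWfree hPWpend hPWfs hperm htagfs htagkeys
    rw [List.pairwise_cons] at hpw
    obtain ⟨htle, hpwrest⟩ := hpw
    obtain ⟨htake_f, hdrop_f⟩ := takeWhile_eq_filter_of_pw t.1 free hPWfree
    obtain ⟨htake_p, hdrop_p⟩ := takeWhile_eq_filter_of_pw t.1 pend hPWpend
    have hrest_birth : ∀ u ∈ rest, t.1 ≤ u.1 := by
      intro u hu
      have h := htle u hu
      rw [keyT, keyT, Prod.Lex.le_iff] at h
      simp only [ofLex_toLex] at h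
      omega
    have htagall : tag.filter (fun q => decide (q.1 ≤ t.1)) = tag := by
      rw [List.filter_eq_self]
      intro q hq
      simp only [decide_eq_true_eq]
      exact htagkeys q hq t List.mem_cons_self
    have htagnone : tag.filter (fun q => !decide (q.1 ≤ t.1)) = [] := by
      rw [List.filter_eq_nil_iff]
      intro q hq
      simp only [Bool.not_eq_true', decide_eq_false_iff_not, Decidable.not_not]
      exact htagkeys q hq t List.mem_cons_self
    have hfree_filter : (free.filter (fun q => decide (q.1 ≤ t.1))).Perm
        (pend.filter (fun q => decide (q.1 ≤ t.1)) ++ tag) := by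
      have h := hperm.filter (fun q => decide (q.1 ≤ t.1))
      rwa [List.filter_append, htagall] at h
    have hfree1_perm : (free.filter (fun q => !decide (q.1 ≤ t.1))).Perm
        (pend.filter (fun q => !decide (q.1 ≤ t.1))) := by
      have h := hperm.filter (fun q => !decide (q.1 ≤ t.1))
      rwa [List.filter_append, htagnone, List.append_nil] at h
    have havail_perm : ((free.filter (fun q => decide (q.1 ≤ t.1))).map (·.2)).Perm
        (List.foldl (fun f s => hpushI f s) fs ((pend.filter (fun q => decide (q.1 ≤ t.1))).map (·.2))) := by
      have h1 := hfree_filter.map (·.2)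
      rw [List.map_append] at h1
      have h2 : (((pend.filter (fun q => decide (q.1 ≤ t.1))).map (·.2)) ++ tag.map (·.2)).Perm
          (((pend.filter (fun q => decide (q.1 ≤ t.1))).map (·.2)) ++ fs) :=
        List.Perm.append_left _ htagfs
      have h3 := foldl_hpushI_perm ((pend.filter (fun q => decide (q.1 ≤ t.1))).map (·.2)) fs
      exact (h1.trans h2).trans h3.symm
    have hfs'_pw := foldl_hpushI_pairwise ((pend.filter (fun q => decide (q.1 ≤ t.1))).map (·.2)) fs hPWfs
    have hfree1_pw : (free.filter (fun q => !decide (q.1 ≤ t.1))).Pairwise (fun a b => keyP a ≤ keyP b) :=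
      List.Pairwise.sublist List.filter_sublist hPWfree
    have hpend1_pw : (pend.filter (fun q => !decide (q.1 ≤ t.1))).Pairwise (fun a b => keyP a ≤ keyP b) :=
      List.Pairwise.sublist List.filter_sublist hPWpend
    simp only [List.foldl_cons, stepA, stepB]
    rw [htake_f, hdrop_f, htake_p, hdrop_p]
    cases hcase : List.foldl (fun f s => hpushI f s) fs
        ((pend.filter (fun q => decide (q.1 ≤ t.1))).map (·.2)) with
    | nil =>
      have havail_nil : (free.filter (fun q => decide (q.1 ≤ t.1))).map (·.2) = [] := by
        have h := havail_perm
        rw [hcase] at h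
        exact h.eq_nil
      rw [havail_nil, if_neg (by simp)]
      refine ih hpwrest _ _ _ _ _ [] (hpush_pairwise _ hfree1_pw) (hpush_pairwise _ hpend1_pw)
        List.Pairwise.nil ?_ (by simp) (by simp)
      · rw [List.append_nil]
        exact (hpush_perm _ _).trans ((hfree1_perm.cons _).trans (hpush_perm _ _).symm)
    | cons s0 rest0 =>
      have havail_perm' : ((free.filter (fun q => decide (q.1 ≤ t.1))).map (·.2)).Perm (s0 :: rest0) := by
        rw [← hcase]
        exact havail_perm
      have hfs'_pw' : (s0 :: rest0).Pairwise (· ≤ ·) := by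
        rw [← hcase]
        exact hfs'_pw
      have hne : (free.filter (fun q => decide (q.1 ≤ t.1))).map (·.2) ≠ [] := by
        intro h
        rw [h] at havail_perm'
        simpa using havail_perm'.length_eq
      rw [if_pos hne, minD_eq_head_of_perm havail_perm' hfs'_pw']
      have hfree2_perm := foldl_condpush_perm (fun s => s != s0) (fun s => (t.1, s))
        ((free.filter (fun q => decide (q.1 ≤ t.1))).map (·.2))
        (free.filter (fun q => !decide (q.1 ≤ t.1)))
      have hrest0_filter : rest0.filter (fun s => s != s0) = rest0.dropWhile (fun s => s == s0) :=
        filter_ne_eq_dropWhile_eq s0 rest0 ((List.pairwise_cons.mp hfs'_pw').2)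
          ((List.pairwise_cons.mp hfs'_pw').1)
      refine ih hpwrest _ _ _ _ _
        ((((free.filter (fun q => decide (q.1 ≤ t.1))).map (·.2)).filter (fun s => s != s0)).map
          (fun s => (t.1, s)))
        (hpush_pairwise _ (foldl_condpush_pairwise _ _ _ _ hfree1_pw))
        (hpush_pairwise _ hpend1_pw)
        (List.Pairwise.sublist (List.dropWhile_sublist _) ((List.pairwise_cons.mp hfs'_pw').2))
        ?_ ?_ ?_
      · have hr : ((hpush (pend.filter (fun q => !decide (q.1 ≤ t.1))) (t.2.1, s0)) ++
            ((((free.filter (fun q => decide (q.1 ≤ t.1))).map (·.2)).filter (fun s => s != s0)).map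
              (fun s => (t.1, s)))).Perm
            ((t.2.1, s0) :: (((((free.filter (fun q => decide (q.1 ≤ t.1))).map (·.2)).filter (fun s => s != s0)).map
              (fun s => (t.1, s))) ++ (pend.filter (fun q => !decide (q.1 ≤ t.1))))) := by
          refine (List.Perm.append_right _ (hpush_perm _ _)).trans ?_
          exact (List.perm_append_comm).cons _
        refine ((hpush_perm _ _).trans ?_).trans hr.symm
        exact (hfree2_perm.trans (List.Perm.append_left _ hfree1_perm)).cons _
      · have hmm : ((((((free.filter (fun q => decide (q.1 ≤ t.1))).map (·.2)).filter (fun s => s != s0)).map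
            (fun s => (t.1, s)))).map (·.2))
            = (((free.filter (fun q => decide (q.1 ≤ t.1))).map (·.2)).filter (fun s => s != s0)) := by
          simp [List.map_map]
        rw [hmm, ← hrest0_filter]
        have h := havail_perm'.filter (fun s => s != s0)
        rwa [List.filter_cons, if_neg (by simp)] at h
      · intro q hq u hu
        obtain ⟨s, _, rfl⟩ := List.mem_map.mp hq
        exact hrest_birth u hu


theorem interval_coloring_spec : Claim_equal_interval_coloring := by
  intro all_dims dim_birth dim_death fixed _
  unfold Spec_interval_coloring
  simp only [interval_coloring, interval_coloring_alt]
  rw [build_items_eq (PySem.Dict.ofList (fixed.getD [])) (PySem.Dict.ofList dim_birth)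
    (PySem.Dict.ofList dim_death) all_dims [] 0, List.nil_append]
  exact congrArg PySem.Dict.items (loop_eq _ (sorted2_pairwise_keyT _) _ _ _ _ _ []
    (foldl_condpush_pairwise _ _ _ _ List.Pairwise.nil)
    (foldl_condpush_pairwise _ _ _ _ List.Pairwise.nil)
    List.Pairwise.nil
    (by simp)
    (by simp)
    (by simp))
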